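-- pv_equiv track=rewrite | github.com/jordicor/GranSabio_LLM | core/feedback_formatter.py | _format_top_words_lines
-- ===== SOURCE A (Python) =====
-- from typing import Any, Dict, List, Optional, Set
--
-- def _format_top_words_lines(entries: List[Dict[str, Any]], limit: int = 50) -> List[str]:
--     """Format repeated words into wrapped lines."""
--
--     truncated = entries[:limit]
--     words = [f"{item.get('word')} (x{item.get('count')})" for item in truncated if item.get("word")]
--     if not words:
--         return []
--     lines: List[str] = []
--     chunk: List[str] = []
--     for idx, token in enumerate(words, start=1):
--         chunk.append(token)
--         if idx % 10 == 0:
--             lines.append(", ".join(chunk))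
--             chunk = []
--     if chunk:
--         lines.append(", ".join(chunk))
--     return lines
-- ===== SOURCE B (Python) =====
-- from typing import Any, Dict, List, Optional, Set
--
-- def _format_top_words_lines(entries: List[Dict[str, Any]], limit: int = 50) -> List[str]:
--     """Format repeated words into wrapped lines."""
--     truncated = entries[:limit]
--     words = [f"{item.get('word')} (x{item.get('count')})" for item in truncated if item.get("word")]
--     return [", ".join(words[i:i + 10]) for i in range(0, len(words), 10)]
-- ===== Notes on version B (the rewrite author's own statement) =====
-- stated objective: simpler
-- what changed: Replaces the stateful token-by-token chunking loop (running chunk list, 1-based counter with idx % 10 flush, trailing-chunk flush, early-empty return) with a direct pass over chunk start indices that emits ', '.join(words[i:i+10]) for each i in range(0, len(words), 10); no early return is needed since an empty words list yields an empty range.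
import Mathlib
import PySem

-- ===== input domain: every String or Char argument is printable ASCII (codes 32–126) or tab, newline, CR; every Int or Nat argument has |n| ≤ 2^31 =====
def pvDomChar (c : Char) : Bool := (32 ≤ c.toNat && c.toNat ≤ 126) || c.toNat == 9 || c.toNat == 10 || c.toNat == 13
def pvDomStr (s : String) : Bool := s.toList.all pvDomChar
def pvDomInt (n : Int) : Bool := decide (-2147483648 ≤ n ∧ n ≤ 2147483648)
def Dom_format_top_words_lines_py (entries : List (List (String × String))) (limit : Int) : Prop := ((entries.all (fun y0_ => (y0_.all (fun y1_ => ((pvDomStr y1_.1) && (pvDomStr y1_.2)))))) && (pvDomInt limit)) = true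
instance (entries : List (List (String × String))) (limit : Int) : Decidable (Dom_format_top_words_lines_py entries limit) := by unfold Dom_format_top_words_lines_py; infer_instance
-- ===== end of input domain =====

-- B replaces A's stateful token-by-token chunking loop (running chunk, idx % 10 flush,
-- trailing flush, early-empty return) with a direct pass over chunk start indices
-- emitting the joined slice words[i:i+10] for each i in range(0, len(words), 10): simpler.


-- ===== PORT A =====
-- Shared first stage (the identical line in both Pythons):
-- the token "f\"{item.get('word')} (x{item.get('count')})\"" for an item whose 'word' is truthy
-- (item.get returns None → "None" inside the f-string; the guard makes 'word' a non-empty string).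
def pvToken (item : List (String × String)) : Option String :=
  let d := PySem.Dict.ofList item
  match d.get? "word" with
  | none => none
  | some w =>
      if w = "" then none
      else some (w ++ " (x" ++ (match d.get? "count" with | some c => c | none => "None") ++ ")")

-- words = [f"..." for item in entries[:limit] if item.get("word")]
def pvWords (entries : List (List (String × String))) (limit : Int) : List String :=
  (PySem.List.slice entries none (some limit)).filterMap pvToken

-- A's loop body: chunk.append(token); if idx % 10 == 0: lines.append(", ".join(chunk)); chunk = []
def pvStepA (s : List String × List String) (p : Int × String) : List String × List String :=
  let c := s.2 ++ [p.2]
  if PySem.Int.mod p.1 10 = 0 then (s.1 ++ [PySem.Str.join ", " c], []) else (s.1, c)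

def format_top_words_lines_py (entries : List (List (String × String))) (limit : Int) : List String :=
  let words := pvWords entries limit
  if words = [] then []
  else
    let r := (PySem.List.enumerate words 1).foldl pvStepA ([], [])
    if r.2 ≠ [] then r.1 ++ [PySem.Str.join ", " r.2] else r.1

-- ===== PORT B =====
-- [", ".join(words[i:i+10]) for i in range(0, len(words), 10)]
def format_top_words_lines_py_alt (entries : List (List (String × String))) (limit : Int) : List String :=
  let words := pvWords entries limit
  (PySem.List.pyRange 0 (words.length : Int) 10).map
    (fun i => PySem.Str.join ", " (PySem.List.slice words (some i) (some (i + 10))))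

-- ===== PRECONDITION & SPEC =====
def Spec_format_top_words_lines_py (entries : List (List (String × String))) (limit : Int) (out : List String) : Prop := out = format_top_words_lines_py_alt entries limit
instance (entries : List (List (String × String))) (limit : Int) (out : List String) : Decidable (Spec_format_top_words_lines_py entries limit out) := by unfold Spec_format_top_words_lines_py; infer_instance

-- ===== CLAIM (what is proved, stated in full; the proofs are below) =====
def Claim_equal_format_top_words_lines_py : Prop := ∀ (entries : List (List (String × String))) (limit : Int), Dom_format_top_words_lines_py entries limit → Spec_format_top_words_lines_py entries limit (format_top_words_lines_py entries limit)

-- ===== LEMMAS AND PROOFS =====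

-- Reference chunking: split into groups of 10, join each with ", ".
def pvChunks10 : List String → List String
  | [] => []
  | w :: t =>
      PySem.Str.join ", " (List.take 10 (w :: t)) :: pvChunks10 (List.drop 10 (w :: t))
  termination_by ws => ws.length
  decreasing_by simp only [List.length_drop, List.length_cons]; omega

theorem pvChunks10_nil : pvChunks10 [] = [] := by simp only [pvChunks10]

theorem pvChunks10_eq (ws : List String) (h : ws ≠ []) :
    pvChunks10 ws = PySem.Str.join ", " (ws.take 10) :: pvChunks10 (ws.drop 10) := by
  cases ws with
  | nil => exact absurd rfl h
  | cons w t => simp only [pvChunks10]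

-- A's loop (with the trailing flush) computes pvChunks10 of the pending chunk ++ remaining words.
theorem pvA_loop (ws : List String) : ∀ (chunk lines : List String) (k : Int),
    chunk.length < 10 →
    (let r := (PySem.List.enumerate ws (10 * k + chunk.length + 1)).foldl pvStepA (lines, chunk)
     if r.2 ≠ [] then r.1 ++ [PySem.Str.join ", " r.2] else r.1) =
      lines ++ pvChunks10 (chunk ++ ws) := by
  induction ws with
  | nil =>
      intro chunk lines k hlen
      simp only [PySem.List.enumerate_nil, List.foldl_nil, List.append_nil]
      by_cases hc : chunk = []
      · subst hc; simp [pvChunks10_nil]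
      · rw [if_pos (show chunk ≠ [] from hc), pvChunks10_eq chunk hc,
            List.take_of_length_le (by omega), List.drop_of_length_le (by omega), pvChunks10_nil]
  | cons w rest ih =>
      intro chunk lines k hlen
      rw [PySem.List.enumerate_cons, List.foldl_cons]
      by_cases h9 : chunk.length = 9
      · -- flush: idx % 10 == 0
        have hz : PySem.Int.mod (10 * k + (chunk.length : Int) + 1) 10 = 0 := by
          rw [PySem.Int.mod_eq_emod_of_pos (by norm_num)]; omega
        have hstep : pvStepA (lines, chunk) (10 * k + (chunk.length : Int) + 1, w) =
            (lines ++ [PySem.Str.join ", " (chunk ++ [w])], []) := by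
          simp only [pvStepA]
          rw [if_pos hz]
        rw [hstep]
        have hnext : 10 * k + (chunk.length : Int) + 1 + 1 =
            10 * (k + 1) + (([] : List String).length : Int) + 1 := by simp; omega
        rw [hnext]
        have hIH := ih [] (lines ++ [PySem.Str.join ", " (chunk ++ [w])]) (k + 1) (by simp)
        simp only [List.nil_append] at hIH
        rw [hIH]
        have hlen10 : (chunk ++ [w]).length = 10 := by simp [h9]
        have hR : pvChunks10 (chunk ++ w :: rest) =
            PySem.Str.join ", " (chunk ++ [w]) :: pvChunks10 rest := by
          have hsplit : chunk ++ w :: rest = (chunk ++ [w]) ++ rest := by simp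
          rw [hsplit, pvChunks10_eq ((chunk ++ [w]) ++ rest) (by simp),
              List.take_left' hlen10, List.drop_left' hlen10]
        rw [hR]
        simp
      · -- no flush
        have hnz : ¬ PySem.Int.mod (10 * k + (chunk.length : Int) + 1) 10 = 0 := by
          rw [PySem.Int.mod_eq_emod_of_pos (by norm_num)]; omega
        have hstep : pvStepA (lines, chunk) (10 * k + (chunk.length : Int) + 1, w) =
            (lines, chunk ++ [w]) := by
          simp only [pvStepA]
          rw [if_neg hnz]
        rw [hstep]
        have hnext : 10 * k + (chunk.length : Int) + 1 + 1 =
            10 * k + ((chunk ++ [w]).length : Int) + 1 := by simp; omega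
        rw [hnext]
        rw [ih (chunk ++ [w]) lines k (by simp; omega)]
        simp

-- B's slice words[i:i+10] at i = 10*k is drop (10*k) then take 10.
theorem pvSlice10 (xs : List String) (j : Nat) :
    PySem.List.slice xs (some (0 + 10 * (j : Int))) (some (0 + 10 * (j : Int) + 10)) =
      (xs.drop (10 * j)).take 10 := by
  have h := PySem.List.slice_natCast_add xs (10 * j) 10
  have e2 : ((10 * j : Nat) : Int) + ((10 : Nat) : Int) = ((10 * j : Nat) : Int) + 10 := by
    norm_num
  have e1 : ((10 * j : Nat) : Int) = 0 + 10 * (j : Int) := by push_cast; ring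
  rw [e2, e1] at h
  exact h

-- The chunk-index map over List.range of the chunk count is pvChunks10.
theorem pvB_chunks (full : List String) :
    (List.range ((full.length + 9) / 10)).map
      (fun kk => PySem.Str.join ", " ((full.drop (10 * kk)).take 10)) = pvChunks10 full := by
  by_cases h : full = []
  · subst h; simp [pvChunks10_nil]
  · have h0 : 0 < full.length := List.length_pos_of_ne_nil h
    have hn : (full.length + 9) / 10 = ((full.length - 10) + 9) / 10 + 1 := by omega
    have hrec := pvB_chunks (full.drop 10)
    simp only [List.length_drop] at hrec
    rw [hn, List.range_succ_eq_map, List.map_cons, List.map_map, pvChunks10_eq full h]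
    refine congrArg₂ List.cons ?_ ?_
    · simp
    · rw [← hrec]
      refine List.map_congr_left ?_
      intro k _
      simp only [Function.comp_apply]
      rw [List.drop_drop, show 10 * Nat.succ k = 10 + 10 * k from by omega]
termination_by full.length
decreasing_by simp only [List.length_drop]; omega

-- ===== VERDICT (by name: the statement is the Claim_ definition above) =====
theorem format_top_words_lines_py_spec : Claim_equal_format_top_words_lines_py := by
  intro entries limit _
  unfold Spec_format_top_words_lines_py format_top_words_lines_py format_top_words_lines_py_alt
  set words := pvWords entries limit with hw
  simp only []
  have hB : (PySem.List.pyRange 0 (words.length : Int) 10).map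
      (fun i => PySem.Str.join ", " (PySem.List.slice words (some i) (some (i + 10)))) =
      pvChunks10 words := by
    rw [PySem.List.pyRange_of_pos 0 (words.length : Int) (by norm_num), List.map_map]
    have hcount : (if (0 : Int) < (words.length : Int)
        then (((words.length : Int) - 0 + 10 - 1) / 10).toNat else 0) =
        (words.length + 9) / 10 := by
      by_cases hp : (0 : Int) < (words.length : Int)
      · simp only [hp, if_pos]
        omega
      · simp only [hp, if_false]
        have : words.length = 0 := by omega
        omega
    rw [hcount, ← pvB_chunks words]
    refine List.map_congr_left ?_
    intro k _
    simp only [Function.comp_apply]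
    rw [pvSlice10 words k]
  rw [hB]
  by_cases h : words = []
  · simp [h, pvChunks10_nil]
  · rw [if_neg h]
    have h1 : (1 : Int) = 10 * 0 + (([] : List String).length : Int) + 1 := by simp
    rw [h1]
    have hA := pvA_loop words [] [] 0 (by simp)
    simp only [List.nil_append] at hA
    exact hA
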